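-- pv_equiv track=rewrite | github.com/petardmnv/Python-Advanced | Exam Preparation/Checkmate.py | find_queen
-- ===== SOURCE A (Python) =====
-- def find_queen(matrix):
--     res = []
--     for i in range(8):
--         if matrix[i].__contains__("Q"):
--             res.append(i)
--             res.append(matrix[i].index("Q"))
--             return res
--     return [-1, -1]
-- ===== SOURCE B (Python) =====
-- def find_queen(matrix):
--     hits = [[i, j] for i, row in enumerate(matrix[:8]) for j, c in enumerate(row) if c == "Q"]
--     return hits[0] if hits else [-1, -1]
-- ===== Notes on version B (the rewrite author's own statement) =====
-- stated objective: alternative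
-- what changed: Replaces A's early-return index loop with membership-then-.index double scan per row by a staged two-pass design: one comprehension collects ALL queen coordinates of the first 8 rows, then the head of that list (or [-1,-1]) is returned.
import Mathlib
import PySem

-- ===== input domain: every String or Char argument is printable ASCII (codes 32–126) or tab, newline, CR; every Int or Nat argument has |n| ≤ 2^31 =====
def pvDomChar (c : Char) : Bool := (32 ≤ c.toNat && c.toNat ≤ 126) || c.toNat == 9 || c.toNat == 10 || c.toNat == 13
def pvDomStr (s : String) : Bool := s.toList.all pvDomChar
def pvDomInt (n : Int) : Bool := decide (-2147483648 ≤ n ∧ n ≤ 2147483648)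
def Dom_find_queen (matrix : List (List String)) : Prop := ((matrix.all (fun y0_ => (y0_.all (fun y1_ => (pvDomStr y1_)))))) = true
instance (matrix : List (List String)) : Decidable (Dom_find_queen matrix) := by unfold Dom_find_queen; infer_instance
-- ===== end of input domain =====

-- B replaces A's early-return loop (contains + .index per row) by a staged design:
-- collect ALL queen coordinates of the first 8 rows, then return the head (alternative, not faster).

-- ===== PORT A =====
-- the 'for i in range(8)' loop with early return: recursion over the remaining indices
def find_queen_loopA (matrix : List (List String)) : List Int → List Int
  | [] => [-1, -1]
  | i :: rest =>
    match PySem.List.pyGet? matrix i with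
    | none => [-1, -1]          -- IndexError in Python; excluded by Pre_
    | some row =>
      if "Q" ∈ row then
        match PySem.List.index? row "Q" with
        | some j => [i, (j : Int)]
        | none => [-1, -1]      -- unreachable: "Q" ∈ row
      else find_queen_loopA matrix rest

def find_queen (matrix : List (List String)) : List Int :=
  find_queen_loopA matrix (PySem.List.pyRange 0 8 1)

-- ===== PORT B =====
-- hits = [[i, j] for i, row in enumerate(matrix[:8]) for j, c in enumerate(row) if c == "Q"]
def find_queen_alt (matrix : List (List String)) : List Int :=
  let hits : List (List Int) :=
    (PySem.List.enumerate (PySem.List.slice matrix none (some 8)) 0).flatMap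
      (fun p => (PySem.List.enumerate p.2 0).flatMap
        (fun q => if q.2 = "Q" then [[p.1, q.1]] else []))
  match hits with              -- hits[0] if hits else [-1, -1]
  | r :: _ => r
  | [] => [-1, -1]

-- ===== PRECONDITION & SPEC =====
-- A raises IndexError iff the board has fewer than 8 rows AND no row contains "Q";
-- Pre_ admits exactly the inputs on which A returns normally.
def Pre_find_queen (matrix : List (List String)) : Prop :=
  (decide (8 ≤ matrix.length) || matrix.any (fun row => row.any (fun s => s == "Q"))) = true
instance (matrix : List (List String)) : Decidable (Pre_find_queen matrix) := by
  unfold Pre_find_queen; infer_instance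

def pvWitness_find_queen : List (List String) := [[".", "Q"]]

def Spec_find_queen (matrix : List (List String)) (out : List Int) : Prop := out = find_queen_alt matrix
instance (matrix : List (List String)) (out : List Int) : Decidable (Spec_find_queen matrix out) := by unfold Spec_find_queen; infer_instance

-- ===== CLAIM (what is proved, stated in full; the proofs are below) =====
def Claim_equal_find_queen : Prop := ∀ (matrix : List (List String)), Dom_find_queen matrix → Pre_find_queen matrix → Spec_find_queen matrix (find_queen matrix)

-- ===== LEMMAS AND PROOFS =====

-- proof-side reference scanner: first queen of a row list, rows indexed from i
def fqGo : List (List String) → Int → List Int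
  | [], _ => [-1, -1]
  | row :: rest, i =>
    match PySem.List.index? row "Q" with
    | some j => [i, (j : Int)]
    | none => fqGo rest (i + 1)

-- the inner comprehension of one row
def innerHits (row : List String) (i j : Int) : List (List Int) :=
  (PySem.List.enumerate row j).flatMap (fun q => if q.2 = "Q" then [[i, q.1]] else [])

theorem innerHits_cons (c : String) (cs : List String) (i j : Int) :
    innerHits (c :: cs) i j
      = (if c = "Q" then [[i, j]] else []) ++ innerHits cs i (j + 1) := by
  simp [innerHits, PySem.List.enumerate_cons]

theorem innerHits_of_not_mem (row : List String) (i : Int) (h : "Q" ∉ row) :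
    ∀ j, innerHits row i j = [] := by
  induction row with
  | nil => intro j; rfl
  | cons c cs ih =>
    intro j
    rw [innerHits_cons]
    have hc : c ≠ "Q" := fun hc => h (hc ▸ List.mem_cons_self)
    rw [if_neg hc, List.nil_append]
    exact ih (fun hm => h (List.mem_cons_of_mem _ hm)) (j + 1)

theorem innerHits_of_index? (row : List String) :
    ∀ (i j : Int) (k : Nat), PySem.List.index? row "Q" = some k →
      ∃ tl, innerHits row i j = [i, j + (k : Int)] :: tl := by
  induction row with
  | nil => intro i j k h; simp [PySem.List.index?] at h
  | cons c cs ih =>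
    intro i j k h
    by_cases hc : c = "Q"
    · subst hc
      rw [PySem.List.index?_cons_self] at h
      obtain rfl : k = 0 := by simpa using h.symm
      refine ⟨innerHits cs i (j + 1), ?_⟩
      rw [innerHits_cons]; simp
    · rw [PySem.List.index?_cons_of_ne cs hc] at h
      cases hcs : PySem.List.index? cs "Q" with
      | none => rw [hcs] at h; simp at h
      | some k' =>
        rw [hcs] at h
        obtain rfl : k = k' + 1 := by simpa using h.symm
        obtain ⟨tl, htl⟩ := ih i (j + 1) k' hcs
        refine ⟨tl, ?_⟩
        rw [innerHits_cons, if_neg hc, List.nil_append, htl]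
        push_cast
        ring_nf

-- head of the full hit list = the reference scanner
theorem hits_head_eq_fqGo (rows : List (List String)) : ∀ (i : Int),
    (match (PySem.List.enumerate rows i).flatMap
        (fun p => innerHits p.2 p.1 0) with
      | r :: _ => r
      | [] => ([-1, -1] : List Int))
      = fqGo rows i := by
  induction rows with
  | nil => intro i; rfl
  | cons row rest ih =>
    intro i
    rw [PySem.List.enumerate_cons]
    simp only [List.flatMap_cons]
    by_cases hq : "Q" ∈ row
    · obtain ⟨k, hk⟩ := Option.isSome_iff_exists.mp
        ((PySem.List.index?_isSome_iff row "Q").mpr hq)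
      obtain ⟨tl, htl⟩ := innerHits_of_index? row i 0 k hk
      rw [htl]
      have hk' : List.idxOf? "Q" row = some k := hk
      simp [fqGo, hk']
    · rw [innerHits_of_not_mem row i hq 0, List.nil_append]
      have := ih (i + 1)
      simp only [fqGo, (PySem.List.index?_eq_none_iff row "Q").mpr hq]
      exact this

-- A's loop over indices k..7 = the reference scanner over the corresponding rows
theorem loopA_eq_fqGo (matrix : List (List String)) : ∀ (k : Nat), k ≤ 8 →
    find_queen_loopA matrix (PySem.List.pyRange (k : Int) 8 1)
      = fqGo ((matrix.take 8).drop k) (k : Int) := by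
  intro k hk
  induction h : 8 - k generalizing k with
  | zero =>
    obtain rfl : k = 8 := by omega
    have h0 : PySem.List.pyRange ((8 : Nat) : Int) 8 1 = [] := by decide
    rw [h0]
    have hd : (matrix.take 8).drop 8 = [] :=
      List.drop_of_length_le (by simp)
    rw [hd]; rfl
  | succ n ihn =>
    have hk8 : k < 8 := by omega
    have hrange : PySem.List.pyRange (k : Int) 8 1 = (k : Int) :: PySem.List.pyRange ((k : Int) + 1) 8 1 := by
      apply PySem.List.pyRange_one_cons; omega
    rw [hrange]
    simp only [find_queen_loopA]
    by_cases hlen : k < matrix.length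
    · have hget : PySem.List.pyGet? matrix (k : Int) = some matrix[k] := by
        rw [PySem.List.pyGet?_natCast]; simp [List.getElem?_eq_getElem hlen]
      rw [hget]
      dsimp only
      have hdrop : (matrix.take 8).drop k = matrix[k] :: (matrix.take 8).drop (k + 1) := by
        have hk' : k < (matrix.take 8).length := by simp; omega
        rw [List.drop_eq_getElem_cons hk']
        congr 1
        simp [hlen]
      rw [hdrop]
      by_cases hq : "Q" ∈ matrix[k]
      · rw [if_pos hq]
        obtain ⟨j, hj⟩ := Option.isSome_iff_exists.mp
          ((PySem.List.index?_isSome_iff matrix[k] "Q").mpr hq)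
        have hj' : List.idxOf? "Q" matrix[k] = some j := hj
        rw [hj]; simp [fqGo, hj']
      · rw [if_neg hq]
        simp only [fqGo, (PySem.List.index?_eq_none_iff matrix[k] "Q").mpr hq]
        have := ihn (k + 1) (by omega) (by omega)
        push_cast at this ⊢
        exact this
    · have hget : PySem.List.pyGet? matrix (k : Int) = none := by
        rw [PySem.List.pyGet?_natCast]; simp; omega
      rw [hget]
      have : (matrix.take 8).drop k = [] := by
        apply List.drop_of_length_le; simp; omega
      rw [this]; rfl

theorem ports_agree (matrix : List (List String)) :
    find_queen matrix = find_queen_alt matrix := by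
  have hA := loopA_eq_fqGo matrix 0 (by omega)
  simp only [Nat.cast_zero, List.drop_zero] at hA
  unfold find_queen find_queen_alt
  rw [hA]
  have hslice : PySem.List.slice matrix none (some (8 : Int)) = matrix.take 8 := by
    rw [PySem.List.slice_to matrix (by omega)]; rfl
  rw [hslice]
  exact (hits_head_eq_fqGo (matrix.take 8) 0).symm

-- ===== VERDICT (by name: the statement is the Claim_ definition above) =====
theorem find_queen_spec : Claim_equal_find_queen := by
  intro matrix _ _
  unfold Spec_find_queen
  exact ports_agree matrix
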